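-- pv_equiv track=rewrite | github.com/JefersonViana/project-algorithms | challenges/challenge_anagrams.py | is_anagram_aux
-- ===== SOURCE A (Python) =====
-- def is_anagram_aux(string: str):
--     letters = list(string.lower())
--     new_string = []
--     for i in string:
--         letter = min(letters)
--         new_string.append(letter)
--         letters.remove(letter)
--     return "".join(new_string)
-- ===== SOURCE B (Python) =====
-- def is_anagram_aux(string: str):
--     return "".join(sorted(string.lower()))
-- ===== Notes on version B (the rewrite author's own statement) =====
-- stated objective: faster
-- what changed: Replaces A's selection-sort loop (repeated min + list.remove over the lowered characters) with a single library sort of the lowered string.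
import Mathlib
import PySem

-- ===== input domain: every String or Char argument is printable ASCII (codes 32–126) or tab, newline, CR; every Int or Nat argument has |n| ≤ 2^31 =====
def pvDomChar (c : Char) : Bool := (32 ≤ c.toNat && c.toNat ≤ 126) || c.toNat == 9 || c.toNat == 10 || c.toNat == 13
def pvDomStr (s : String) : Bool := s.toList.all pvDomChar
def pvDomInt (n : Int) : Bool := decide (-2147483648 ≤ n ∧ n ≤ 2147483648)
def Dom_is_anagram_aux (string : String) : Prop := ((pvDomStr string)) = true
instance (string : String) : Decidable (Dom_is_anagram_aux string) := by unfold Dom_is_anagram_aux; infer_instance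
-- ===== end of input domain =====

-- B replaces A's selection-sort loop (repeated min + remove) with one library sort: O(n^2) -> O(n log n).

-- ===== PORT A =====
-- A's loop: for each char of the original string, take min(letters), append it, remove it.
-- The 'none' branches correspond to Python's ValueError on min([])/remove; they are
-- unreachable at A's call site since letters starts with length = len(string).
def pvSelLoop (iter : List Char) (letters : List Char) (acc : List Char) : List Char :=
  match iter with
  | [] => acc
  | _ :: rest =>
    match PySem.List.min? letters (fun x => x) with
    | none => acc
    | some m =>
      match PySem.List.remove? letters m with
      | none => acc
      | some letters' => pvSelLoop rest letters' (acc ++ [m])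

def is_anagram_aux (string : String) : String :=
  String.ofList (pvSelLoop string.toList (PySem.Chars.lower string.toList) [])

-- ===== PORT B =====
def is_anagram_aux_alt (string : String) : String :=
  String.ofList (PySem.List.sorted (PySem.Chars.lower string.toList) (fun x => x) false)

-- ===== PRECONDITION & SPEC =====
def Spec_is_anagram_aux (string : String) (out : String) : Prop := out = is_anagram_aux_alt string
instance (string : String) (out : String) : Decidable (Spec_is_anagram_aux string out) := by unfold Spec_is_anagram_aux; infer_instance

-- ===== CLAIM (what is proved, stated in full; the proofs are below) =====
def Claim_equal_is_anagram_aux : Prop := ∀ (string : String), Dom_is_anagram_aux string → Spec_is_anagram_aux string (is_anagram_aux string)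

-- ===== LEMMAS AND PROOFS =====

-- One selection step peels the minimum off the sorted list.
theorem pv_sorted_step (letters l' : List Char) (m : Char)
    (hmin : PySem.List.min? letters (fun x => x) = some m)
    (hrem : PySem.List.remove? letters m = some l') :
    PySem.List.sorted letters (fun x => x) false = m :: PySem.List.sorted l' (fun x => x) false := by
  have hm : m ∈ letters := PySem.List.min?_mem hmin
  have hl' : l' = letters.erase m := by
    rw [PySem.List.remove?_eq_some_erase letters m hm] at hrem
    exact (Option.some.injEq _ _).mp hrem.symm
  have hperm : (PySem.List.sorted letters (fun x => x) false).Perm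
      (m :: PySem.List.sorted l' (fun x => x) false) := by
    have h1 : (PySem.List.sorted l' (fun x => x) false).Perm l' := PySem.List.sorted_perm ..
    have h2 : letters.Perm (m :: letters.erase m) := List.perm_cons_erase hm
    exact (PySem.List.sorted_perm ..).trans ((hl' ▸ h2).trans ((h1.cons m).symm))
  have hs1 : List.Pairwise (· ≤ ·) (PySem.List.sorted letters (fun x => x) false) :=
    PySem.List.sorted_pairwise ..
  have hs2 : List.Pairwise (· ≤ ·) (m :: PySem.List.sorted l' (fun x => x) false) := by
    refine List.Pairwise.cons ?_ (PySem.List.sorted_pairwise ..)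
    intro y hy
    have hy' : y ∈ l' := (PySem.List.mem_sorted ..).mp hy
    have hyl : y ∈ letters := by
      rw [hl'] at hy'; exact List.mem_of_mem_erase hy'
    exact PySem.List.min?_isMin hmin y hyl
  exact List.Perm.eq_of_pairwise (fun a b _ _ h1 h2 => le_antisymm h1 h2) hs1 hs2 hperm

-- Loop invariant: with as many iterations left as letters, the loop emits sorted(letters).
theorem pvSelLoop_eq_sorted (iter : List Char) :
    ∀ (letters acc : List Char), letters.length = iter.length →
    pvSelLoop iter letters acc = acc ++ PySem.List.sorted letters (fun x => x) false := by
  induction iter with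
  | nil =>
    intro letters acc h
    have : letters = [] := List.eq_nil_of_length_eq_zero h
    simp [pvSelLoop, this, PySem.List.sorted]
  | cons c rest ih =>
    intro letters acc h
    have hne : letters ≠ [] := by intro he; simp [he] at h
    obtain ⟨m, hmin⟩ : ∃ m, PySem.List.min? letters (fun x => x) = some m := by
      cases hm : PySem.List.min? letters (fun x => x) with
      | none => exact absurd ((PySem.List.min?_eq_none_iff ..).mp hm) hne
      | some m => exact ⟨m, rfl⟩
    have hm : m ∈ letters := PySem.List.min?_mem hmin
    obtain ⟨l', hrem⟩ : ∃ l', PySem.List.remove? letters m = some l' :=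
      ⟨letters.erase m, PySem.List.remove?_eq_some_erase letters m hm⟩
    have hlen : l'.length = rest.length := by
      have he : l' = letters.erase m := by
        rw [PySem.List.remove?_eq_some_erase letters m hm] at hrem
        exact (Option.some.injEq _ _).mp hrem.symm
      subst he
      rw [List.length_erase_of_mem hm]
      simp at h; omega
    simp only [pvSelLoop, hmin, hrem]
    rw [ih l' (acc ++ [m]) hlen, pv_sorted_step letters l' m hmin hrem]
    simp

-- ===== VERDICT (by name: the statement is the Claim_ definition above) =====
theorem is_anagram_aux_spec : Claim_equal_is_anagram_aux := by
  intro s _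
  unfold Spec_is_anagram_aux is_anagram_aux is_anagram_aux_alt
  rw [pvSelLoop_eq_sorted s.toList (PySem.Chars.lower s.toList) [] (by simp [PySem.Chars.lower])]
  simp
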